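-- pv_equiv track=rewrite | github.com/SalvatoreGaetanoScala/pyZelda | pyZeldA_1.0/ui/pause_menu.py | get_display_list
-- ===== SOURCE A (Python) =====
-- from collections import Counter
--
-- def get_display_list(raw_list):
--     if not raw_list:
--         return ["Vuoto"]
--     counts = Counter(raw_list)
--     display_list = []
--     for name in sorted(counts.keys()):
--         count = counts[name]
--         if count > 1: display_list.append(f"{name} x{count}")
--         else: display_list.append(name)
--     return display_list
-- ===== SOURCE B (Python) =====
-- def get_display_list(raw_list):
--     if not raw_list:
--         return ["Vuoto"]
--     s = sorted(raw_list)
--     out = []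
--     cur = s[0]
--     cnt = 1
--     for name in s[1:]:
--         if name == cur:
--             cnt += 1
--         else:
--             out.append(cur if cnt == 1 else f"{cur} x{cnt}")
--             cur, cnt = name, 1
--     out.append(cur if cnt == 1 else f"{cur} x{cnt}")
--     return out
-- ===== Notes on version B (the rewrite author's own statement) =====
-- stated objective: alternative
-- what changed: B sorts the whole list once and groups consecutive equal names in a single scan with a running count, instead of A's Counter dict followed by iterating over sorted unique keys.
import Mathlib
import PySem

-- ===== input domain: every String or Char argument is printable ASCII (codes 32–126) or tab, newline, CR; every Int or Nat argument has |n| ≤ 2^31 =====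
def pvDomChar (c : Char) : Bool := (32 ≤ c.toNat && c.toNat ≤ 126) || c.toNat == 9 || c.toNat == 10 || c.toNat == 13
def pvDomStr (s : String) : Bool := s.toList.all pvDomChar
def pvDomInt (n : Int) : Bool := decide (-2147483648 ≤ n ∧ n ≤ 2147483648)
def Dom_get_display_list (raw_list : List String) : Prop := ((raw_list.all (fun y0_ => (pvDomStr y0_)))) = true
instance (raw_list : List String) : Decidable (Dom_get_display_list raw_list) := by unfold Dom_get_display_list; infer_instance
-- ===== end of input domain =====

-- B replaces A's Counter-plus-sorted-unique-keys pass by sorting the whole list once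
-- and grouping consecutive equal names in a single scan (objective: alternative).

-- ===== PORT A =====
def get_display_list (raw_list : List String) : List String :=
  if raw_list = [] then ["Vuoto"]
  else
    let counts := PySem.Dict.counter raw_list
    (PySem.List.sorted counts.keys (fun x => x)).foldl
      (fun display_list name =>
        let count := counts.getD name 0
        if count > 1 then display_list ++ [name ++ " x" ++ PySem.Int.toStr count]
        else display_list ++ [name]) []

-- ===== PORT B =====
-- the expression `cur if cnt == 1 else f"{cur} x{cnt}"` appearing twice in Source B
def pvEntryB (cur : String) (cnt : Int) : String :=
  if cnt == 1 then cur else cur ++ " x" ++ PySem.Int.toStr cnt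

-- Source B's for-loop over s[1:] carrying (cur, cnt, out), plus the trailing append
def pvGroupB : List String → String → Int → List String → List String
  | [], cur, cnt, out => out ++ [pvEntryB cur cnt]
  | name :: rest, cur, cnt, out =>
    if name = cur then pvGroupB rest cur (cnt + 1) out
    else pvGroupB rest name 1 (out ++ [pvEntryB cur cnt])

def get_display_list_alt (raw_list : List String) : List String :=
  if raw_list = [] then ["Vuoto"]
  else
    match PySem.List.sorted raw_list (fun x => x) with
    | [] => []  -- unreachable: sorted of a nonempty list is nonempty
    | h :: t => pvGroupB t h 1 []

-- ===== PRECONDITION & SPEC =====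
def Spec_get_display_list (raw_list : List String) (out : List String) : Prop := out = get_display_list_alt raw_list
instance (raw_list : List String) (out : List String) : Decidable (Spec_get_display_list raw_list out) := by unfold Spec_get_display_list; infer_instance

-- ===== CLAIM (what is proved, stated in full; the proofs are below) =====
def Claim_equal_get_display_list : Prop := ∀ (raw_list : List String), Dom_get_display_list raw_list → Spec_get_display_list raw_list (get_display_list raw_list)

-- ===== LEMMAS AND PROOFS =====

-- run-grouping of an (already sorted) list, with explicit run lengths
def pvG : List String → List String
  | [] => []
  | a :: t => pvEntryB a (1 + (t.count a : Int)) :: pvG (t.dropWhile (fun x => x == a))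
termination_by s => s.length
decreasing_by
  simpa using Nat.lt_succ_of_le (List.Sublist.length_le (List.dropWhile_sublist _))

lemma pvGroupB_eq (t : List String) : ∀ (cur : String) (cnt : Int) (out : List String),
    (cur :: t).Pairwise (· ≤ ·) →
    pvGroupB t cur cnt out
      = out ++ pvEntryB cur (cnt + (t.count cur : Int)) :: pvG (t.dropWhile (fun x => x == cur)) := by
  induction t with
  | nil => intro cur cnt out _; simp [pvGroupB, pvG]
  | cons name rest ih =>
    intro cur cnt out hp
    by_cases h : name = cur
    · subst h
      have hp' : (name :: rest).Pairwise (· ≤ ·) := by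
        rcases List.pairwise_cons.mp hp with ⟨h1, h2⟩
        exact List.pairwise_cons.mpr
          ⟨fun x hx => h1 x (List.mem_cons_of_mem _ hx), (List.pairwise_cons.mp h2).2⟩
      rw [pvGroupB, if_pos rfl, ih name (cnt + 1) out hp']
      have hc : (cnt + 1) + ((rest.count name : Nat) : Int)
          = cnt + (((name :: rest).count name : Nat) : Int) := by
        rw [List.count_cons_self]; push_cast; ring
      rw [hc]
      simp [List.dropWhile]
    · have hcn : cur ∉ name :: rest := by
        intro hmem
        rcases List.mem_cons.mp hmem with h1 | h2
        · exact h h1.symm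
        · have h3 : name ≤ cur := List.rel_of_pairwise_cons (List.pairwise_cons.mp hp).2 h2
          have h4 : cur ≤ name := (List.pairwise_cons.mp hp).1 name List.mem_cons_self
          exact h (le_antisymm h3 h4)
      have hc0 : (name :: rest).count cur = 0 := List.count_eq_zero.mpr hcn
      rw [pvGroupB, if_neg h,
        ih name 1 (out ++ [pvEntryB cur cnt]) (hp.sublist (List.sublist_cons_self _ _))]
      have hdw : (name :: rest).dropWhile (fun x => x == cur) = name :: rest := by
        rw [List.dropWhile_cons_of_neg]; simp [h]
      rw [hc0, hdw, pvG]
      simp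

lemma pvG_spec_len (n : Nat) : ∀ (s : List String), s.length ≤ n → s.Pairwise (· ≤ ·) →
    pvG s = (PySem.List.sorted (PySem.Set.ofList s) (fun x => x)).map
      (fun m => pvEntryB m ((s.count m : Nat) : Int)) := by
  induction n with
  | zero =>
    intro s hlen _
    have : s = [] := List.eq_nil_of_length_eq_zero (Nat.le_zero.mp hlen)
    subst this
    simp [pvG, PySem.Set.ofList, PySem.List.sorted]
  | succ n ih =>
    intro s hlen hp
    cases s with
    | nil => simp [pvG, PySem.Set.ofList, PySem.List.sorted]
    | cons a t =>
      have hhead : ∀ x ∈ t, a ≤ x := (List.pairwise_cons.mp hp).1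
      have htp : t.Pairwise (· ≤ ·) := (List.pairwise_cons.mp hp).2
      set t' := t.dropWhile (fun x => x == a) with ht'
      have ht'sub : t'.Sublist t := List.dropWhile_sublist _
      have ht'p : t'.Pairwise (· ≤ ·) := htp.sublist ht'sub
      have htk : ∀ x ∈ t.takeWhile (fun x => x == a), x = a := by
        intro x hx
        have := List.mem_takeWhile_imp hx
        simpa using this
      have hsplit : t.takeWhile (fun x => x == a) ++ t' = t := List.takeWhile_append_dropWhile
      have hanot : a ∉ t' := by
        intro ha
        cases ht'' : t' with
        | nil => rw [ht''] at ha; simp at ha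
        | cons b u =>
          have hbna : ¬ (b == a) = true := by
            have := List.head?_dropWhile_not (fun x => x == a) t
            rw [← ht', ht''] at this; simpa using this
          rw [ht''] at ha
          rcases List.mem_cons.mp ha with h1 | h2
          · exact hbna (by simp [h1])
          · have hble : b ≤ a := by
              have : List.Pairwise (· ≤ ·) (b :: u) := ht'' ▸ ht'p
              exact List.rel_of_pairwise_cons this h2
            have haleb : a ≤ b := hhead b (ht'sub.mem (ht'' ▸ List.mem_cons_self))
            exact hbna (by simp [le_antisymm hble haleb])
      -- the sorted distinct keys of a :: t are a followed by those of t'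
      have hK : PySem.List.sorted (PySem.Set.ofList (a :: t)) (fun x => x)
          = a :: PySem.List.sorted (PySem.Set.ofList t') (fun x => x) := by
        apply PySem.List.sorted_eq_of_perm_of_pairwise_lt
        · apply (List.perm_ext_iff_of_nodup _ (PySem.Set.nodup_ofList _)).mpr
          · intro x
            simp only [List.mem_cons, PySem.List.mem_sorted, PySem.Set.mem_ofList]
            constructor
            · rintro (rfl | hx)
              · exact Or.inl rfl
              · exact Or.inr (ht'sub.mem hx)
            · rintro (rfl | hx)
              · exact Or.inl rfl
              · rw [← hsplit] at hx
                rcases List.mem_append.mp hx with h1 | h2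
                · exact Or.inl (htk x h1)
                · exact Or.inr h2
          · refine List.nodup_cons.mpr ⟨?_, ?_⟩
            · intro ha
              exact hanot ((PySem.Set.mem_ofList _ _).mp ((PySem.List.mem_sorted _ _ _ _).mp ha))
            · exact ((PySem.List.sorted_perm _ _ _).nodup_iff).mpr (PySem.Set.nodup_ofList _)
        · refine List.pairwise_cons.mpr ⟨?_, ?_⟩
          · intro x hx
            have hxt' : x ∈ t' := (PySem.Set.mem_ofList _ _).mp ((PySem.List.mem_sorted _ _ _ _).mp hx)
            have hle : a ≤ x := hhead x (ht'sub.mem hxt')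
            exact lt_of_le_of_ne hle (fun h => hanot (h ▸ hxt'))
          · exact PySem.List.sorted_ofList_pairwise_lt t'
      have hlen' : t'.length ≤ n :=
        le_trans ht'sub.length_le (Nat.le_of_succ_le_succ hlen)
      rw [pvG, hK, List.map_cons, ih t' hlen' ht'p]
      congr 1
      · rw [List.count_cons_self]; push_cast; ring_nf
      · apply List.map_congr_left
        intro m hm
        have hmt' : m ∈ t' := (PySem.Set.mem_ofList _ _).mp ((PySem.List.mem_sorted _ _ _ _).mp hm)
        have hmna : m ≠ a := fun h => hanot (h ▸ hmt')
        have : (a :: t).count m = t'.count m := by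
          rw [List.count_cons_of_ne (Ne.symm hmna), ← hsplit, List.count_append]
          have : (t.takeWhile (fun x => x == a)).count m = 0 := by
            apply List.count_eq_zero.mpr
            intro hmem
            exact hmna (htk m hmem)
          omega
        rw [this]

lemma pvG_spec (s : List String) (hp : s.Pairwise (· ≤ ·)) :
    pvG s = (PySem.List.sorted (PySem.Set.ofList s) (fun x => x)).map
      (fun m => pvEntryB m ((s.count m : Nat) : Int)) :=
  pvG_spec_len s.length s le_rfl hp

-- ===== VERDICT (by name: the statement is the Claim_ definition above) =====
theorem get_display_list_spec : Claim_equal_get_display_list := by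
  intro raw_list _
  unfold Spec_get_display_list
  by_cases hnil : raw_list = []
  · subst hnil; rfl
  · -- B side: alt computes pvG of the sorted list
    set s := PySem.List.sorted raw_list (fun x => x) with hs
    have hsp : s.Pairwise (· ≤ ·) := PySem.List.sorted_pairwise raw_list (fun x => x)
    have hsperm : s.Perm raw_list := PySem.List.sorted_perm raw_list (fun x => x) false
    have hsnil : s ≠ [] := by
      rw [hs, Ne, PySem.List.sorted_eq_nil_iff]; exact hnil
    obtain ⟨h, t, hht⟩ := List.exists_cons_of_ne_nil hsnil
    have halt : get_display_list_alt raw_list = pvG s := by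
      rw [get_display_list_alt, if_neg hnil, ← hs, hht]
      show pvGroupB t h 1 [] = _
      rw [pvGroupB_eq t h 1 [] (hht ▸ hsp)]
      rw [pvG]
      norm_num
    -- A side: the foldl is a map over the sorted distinct keys
    have ha : get_display_list raw_list
        = (PySem.List.sorted (PySem.Set.ofList raw_list) (fun x => x)).map
            (fun name => if (PySem.Dict.counter raw_list).getD name 0 > 1
              then name ++ " x" ++ PySem.Int.toStr ((PySem.Dict.counter raw_list).getD name 0)
              else name) := by
      rw [get_display_list, if_neg hnil]
      show (PySem.List.sorted (PySem.Dict.counter raw_list).keys (fun x => x)).foldl _ [] = _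
      rw [PySem.Dict.keys_counter]
      have hfun : (fun (display_list : List String) name =>
          let count := (PySem.Dict.counter raw_list).getD name 0
          if count > 1 then display_list ++ [name ++ " x" ++ PySem.Int.toStr count]
          else display_list ++ [name])
          = fun (display_list : List String) name => display_list ++
              [if (PySem.Dict.counter raw_list).getD name 0 > 1
                then name ++ " x" ++ PySem.Int.toStr ((PySem.Dict.counter raw_list).getD name 0)
                else name] := by
        funext dl name
        show (if (PySem.Dict.counter raw_list).getD name 0 > 1 then _ else _) = _
        split_ifs <;> rfl
      rw [hfun, PySem.List.foldl_append_singleton_eq_map]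
      rfl
    rw [ha, halt, pvG_spec s hsp]
    -- the two key lists agree
    have hkeys : PySem.List.sorted (PySem.Set.ofList raw_list) (fun x => x)
        = PySem.List.sorted (PySem.Set.ofList s) (fun x => x) := by
      apply PySem.List.sorted_eq_sorted_of_perm _ _ _ (fun _ _ h => h)
      apply (List.perm_ext_iff_of_nodup (PySem.Set.nodup_ofList _) (PySem.Set.nodup_ofList _)).mpr
      intro x
      rw [PySem.Set.mem_ofList, PySem.Set.mem_ofList]
      exact Iff.symm (hsperm.mem_iff)
    rw [hkeys]
    apply List.map_congr_left
    intro m hm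
    have hms : m ∈ s := (PySem.Set.mem_ofList _ _).mp ((PySem.List.mem_sorted _ _ _ _).mp hm)
    have hcnt : (PySem.Dict.counter raw_list).getD m 0 = ((s.count m : Nat) : Int) := by
      rw [PySem.Dict.getD_counter, hsperm.count_eq]
    rw [hcnt]
    have hpos : 1 ≤ s.count m := List.count_pos_iff.mpr hms
    rw [pvEntryB]
    rcases Nat.lt_or_ge 1 (s.count m) with hgt | hle
    · rw [if_pos (by exact_mod_cast hgt), if_neg (by simp; omega)]
    · have h1 : s.count m = 1 := le_antisymm hle hpos
      rw [h1]; norm_num
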